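-- pv_equiv track=rewrite | github.com/GidionOndari/Mtrader | api_gateway/src/routes/ws.py | _topic_allowed
-- ===== SOURCE A (Python) =====
-- def _topic_allowed(topic: str, claims: dict) -> bool:
--     allowed_prefixes = [
--         f"user:{claims['sub']}",
--         f"account_updates:{claims['sub']}",
--         f"position_updates:{claims['sub']}",
--         f"order_updates:{claims['sub']}",
--         f"market_data:{claims['sub']}",
--         f"calendar_updates:{claims['sub']}",
--         f"strategy_signals:{claims['sub']}",
--     ]
--     return any(topic.startswith(p) for p in allowed_prefixes)
-- ===== SOURCE B (Python) =====
-- CATEGORIES = {'user', 'account_updates', 'position_updates', 'order_updates',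
--               'market_data', 'calendar_updates', 'strategy_signals'}
--
--
-- def _topic_allowed(topic: str, claims: dict) -> bool:
--     sub = claims['sub']
--     cat, sep, rest = topic.partition(':')
--     return sep == ':' and cat in CATEGORIES and rest.startswith(sub)
-- ===== Notes on version B (the rewrite author's own statement) =====
-- stated objective: simpler
-- what changed: Instead of building seven 'category:sub' prefix strings and scanning them with any(startswith), B parses the topic once at its first colon (str.partition), looks the category up in a set, and does a single startswith against the sub claim.
import Mathlib
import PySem

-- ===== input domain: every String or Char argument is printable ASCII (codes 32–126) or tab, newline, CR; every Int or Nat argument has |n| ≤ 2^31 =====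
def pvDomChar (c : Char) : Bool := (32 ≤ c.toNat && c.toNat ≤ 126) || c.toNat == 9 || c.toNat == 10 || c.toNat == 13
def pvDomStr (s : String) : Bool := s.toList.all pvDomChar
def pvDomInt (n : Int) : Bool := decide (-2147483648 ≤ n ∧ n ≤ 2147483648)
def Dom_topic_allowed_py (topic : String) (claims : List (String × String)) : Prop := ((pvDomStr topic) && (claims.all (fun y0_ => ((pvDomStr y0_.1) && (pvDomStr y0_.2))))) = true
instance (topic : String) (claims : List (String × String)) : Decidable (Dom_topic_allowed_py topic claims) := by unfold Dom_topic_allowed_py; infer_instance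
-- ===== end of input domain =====

-- B replaces A's scan of seven concatenated prefixes by a single parse of the topic
-- (split at the first ':') followed by a category lookup and one startswith (objective: simpler).

-- ===== PORT A =====
-- literal port of A: build the seven prefix strings f"<cat>:{claims['sub']}" and test any(topic.startswith(p))
def topic_allowed_py (topic : String) (claims : List (String × String)) : Bool :=
  let sub := (claims.lookup "sub").getD ""   -- claims['sub']; Pre_ guarantees the key is present
  let allowed_prefixes : List (List Char) :=
    [ "user:".toList ++ sub.toList
    , "account_updates:".toList ++ sub.toList
    , "position_updates:".toList ++ sub.toList
    , "order_updates:".toList ++ sub.toList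
    , "market_data:".toList ++ sub.toList
    , "calendar_updates:".toList ++ sub.toList
    , "strategy_signals:".toList ++ sub.toList ]
  allowed_prefixes.any (fun p => PySem.Chars.startswith topic.toList p)

-- ===== PORT B =====
def pvCategories : List (List Char) :=
  [ "user".toList, "account_updates".toList, "position_updates".toList, "order_updates".toList
  , "market_data".toList, "calendar_updates".toList, "strategy_signals".toList ]

-- literal port of B: topic.partition(':') is ported by hand as find-first-':' then take/drop (exact)
def topic_allowed_py_alt (topic : String) (claims : List (String × String)) : Bool :=
  let sub := (claims.lookup "sub").getD ""   -- claims['sub']; Pre_ guarantees the key is present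
  let t := topic.toList
  let i := PySem.Chars.find t [':']
  if i = -1 then false   -- sep ≠ ':' : no colon in topic
  else
    let cat := t.take i.toNat
    let rest := t.drop (i.toNat + 1)
    decide (cat ∈ pvCategories) && PySem.Chars.startswith rest sub.toList

-- ===== PRECONDITION & SPEC =====
-- Pre_ excludes exactly the claims dicts without a "sub" key, on which Python A raises KeyError.
def Pre_topic_allowed_py (topic : String) (claims : List (String × String)) : Prop :=
  "sub" ∈ claims.map Prod.fst
instance (topic : String) (claims : List (String × String)) : Decidable (Pre_topic_allowed_py topic claims) := by unfold Pre_topic_allowed_py; infer_instance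
def pvWitness_topic_allowed_py : String × (List (String × String)) := ("user:alice", [("sub", "alice")])

def Spec_topic_allowed_py (topic : String) (claims : List (String × String)) (out : Bool) : Prop := out = topic_allowed_py_alt topic claims
instance (topic : String) (claims : List (String × String)) (out : Bool) : Decidable (Spec_topic_allowed_py topic claims out) := by unfold Spec_topic_allowed_py; infer_instance

-- ===== CLAIM (what is proved, stated in full; the proofs are below) =====
def Claim_equal_topic_allowed_py : Prop := ∀ (topic : String) (claims : List (String × String)), Dom_topic_allowed_py topic claims → Pre_topic_allowed_py topic claims → Spec_topic_allowed_py topic claims (topic_allowed_py topic claims)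

-- ===== LEMMAS AND PROOFS =====

-- [x] is a prefix of l iff l starts with x
theorem singleton_prefix_iff {α : Type} (x : α) (l : List α) : [x] <+: l ↔ l.head? = some x := by
  cases l with
  | nil => simp
  | cons y ys =>
    constructor
    · rintro ⟨t, ht⟩; simp at ht; simp [ht.1]
    · intro h; simp at h; exact ⟨ys, by simp [h]⟩

-- core equivalence over char lists
theorem core (t sub : List Char) :
    (pvCategories.map (fun c => c ++ [':'] ++ sub)).any (fun p => PySem.Chars.startswith t p) =
    (let i := PySem.Chars.find t [':']
     if i = -1 then false
     else decide (t.take i.toNat ∈ pvCategories) && PySem.Chars.startswith (t.drop (i.toNat + 1)) sub) := by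
  have hnocolon : ∀ c ∈ pvCategories, (':' : Char) ∉ c := by decide
  simp only []
  by_cases h : PySem.Chars.find t [':'] = -1
  · rw [if_pos h]
    rw [PySem.Chars.find_eq_neg_one_iff] at h
    simp only [List.any_map, List.any_eq_false, Function.comp]
    intro c hc
    rw [Bool.not_eq_true, ← Bool.not_eq_true, PySem.Chars.startswith_iff]
    intro hpre
    exact h ((show [':'] <:+: c ++ [':'] ++ sub from ⟨c, sub, by simp⟩).trans hpre.isInfix)
  · rw [if_neg h]
    have h0 : 0 ≤ PySem.Chars.find t [':'] := by
      have := PySem.Chars.neg_one_le_find t [':']; omega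
    set n := (PySem.Chars.find t [':']).toNat with hn
    obtain ⟨hpre, hmin⟩ := PySem.Chars.find_spec (s := t) (sub := [':']) h0
    rw [singleton_prefix_iff] at hpre
    rw [List.head?_drop] at hpre
    have hlt : n < t.length := by
      by_contra hge
      rw [List.getElem?_eq_none (le_of_not_gt hge)] at hpre
      simp at hpre
    have hget : t[n] = ':' := by
      have := List.getElem?_eq_getElem hlt
      rw [this] at hpre; exact (Option.some_injective _ hpre).symm ▸ rfl
    rw [Bool.eq_iff_iff]
    simp only [List.any_map, List.any_eq_true, Function.comp, PySem.Chars.startswith_iff,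
      Bool.and_eq_true, decide_eq_true_eq]
    constructor
    · rintro ⟨c, hc, u, hu⟩
      have hu' : t = c ++ (':' :: (sub ++ u)) := by rw [← hu]; simp
      have hle : ¬ c.length < n := by
        intro hlt'
        apply hmin c.length hlt'
        rw [singleton_prefix_iff, List.head?_drop, hu']
        rw [List.getElem?_append_right (by omega)]
        simp
      have hge : ¬ n < c.length := by
        intro hlt'
        apply hnocolon c hc
        have h1 : t[n]? = some ':' := by rw [List.getElem?_eq_getElem hlt, hget]
        rw [hu', List.getElem?_append_left hlt'] at h1
        exact List.mem_of_getElem? h1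
      have heq : c.length = n := by omega
      refine ⟨?_, u, ?_⟩
      · rw [hu', ← heq, List.take_left]; exact hc
      · have h2 : t = (c ++ [':']) ++ (sub ++ u) := by rw [hu']; simp
        rw [h2, List.drop_left' (by simp [heq])]
    · rintro ⟨hmem, u, hu⟩
      refine ⟨t.take n, hmem, u, ?_⟩
      have hdrop : t.drop n = ':' :: t.drop (n+1) := by
        rw [List.drop_eq_getElem_cons hlt, hget]
      calc t.take n ++ [':'] ++ sub ++ u
          = t.take n ++ (':' :: (sub ++ u)) := by simp
        _ = t.take n ++ (':' :: t.drop (n+1)) := by rw [hu]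
        _ = t.take n ++ t.drop n := by rw [hdrop]
        _ = t := List.take_append_drop n t

-- ===== VERDICT =====
theorem topic_allowed_py_spec : Claim_equal_topic_allowed_py := by
  intro topic claims _ _
  unfold Spec_topic_allowed_py topic_allowed_py topic_allowed_py_alt
  have h := core topic.toList ((claims.lookup "sub").getD "").toList
  simpa [pvCategories] using h
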